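-- pv_equiv track=rewrite | github.com/chubin/cheat.sh | lib/adapter/cheat_sheets.py | _sanitize_dirnames
-- ===== SOURCE A (Python) =====
-- def _sanitize_dirnames(filename, restore=False):
--     """
--     Remove (or add) leading _ in the directories names in `filename`
--     The `restore` param means that the path name should be restored from the queryname,
--     i.e. conversion should be done in the opposite direction
--     """
--     parts = filename.split('/')
--     newparts = []
--     for part in parts[:-1]:
--         if restore:
--             newparts.append('_'+part)
--             continue
--         if part.startswith('_'):
--             newparts.append(part[1:])
--         else:
--             newparts.append(part)
--     newparts.append(parts[-1])
--
--     return "/".join(newparts)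
-- ===== SOURCE B (Python) =====
-- def _sanitize_dirnames(filename, restore=False):
--     """Single character scan over the directory head; faster-free, simpler state machine."""
--     head, sep, last = filename.rpartition('/')
--     if not sep:
--         return filename
--     out = []
--     at_start = True
--     for ch in head + '/':
--         if at_start:
--             if restore:
--                 out.append('_')
--             elif ch == '_':
--                 at_start = False
--                 continue
--         at_start = (ch == '/')
--         out.append(ch)
--     return ''.join(out) + last
-- ===== Notes on version B (the rewrite author's own statement) =====
-- stated objective: alternative
-- what changed: Replaces split('/')/loop-over-parts/join with rpartition on the last '/' followed by a single two-state character scan over the directory head that inserts or swallows one '_' at each component start.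
import Mathlib
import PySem

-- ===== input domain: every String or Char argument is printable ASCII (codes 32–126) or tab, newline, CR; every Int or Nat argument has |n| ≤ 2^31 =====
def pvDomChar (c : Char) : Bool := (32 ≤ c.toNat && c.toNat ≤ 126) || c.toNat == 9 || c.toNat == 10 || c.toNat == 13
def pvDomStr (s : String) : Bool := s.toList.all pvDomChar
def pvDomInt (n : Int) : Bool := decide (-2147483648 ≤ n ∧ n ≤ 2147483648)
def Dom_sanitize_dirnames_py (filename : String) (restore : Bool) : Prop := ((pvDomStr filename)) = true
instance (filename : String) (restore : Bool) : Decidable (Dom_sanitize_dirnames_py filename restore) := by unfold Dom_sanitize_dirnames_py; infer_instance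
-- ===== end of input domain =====

-- B re-implements A with rpartition on the last '/' plus a single character scan over the
-- directory head (a two-state machine), instead of A's split/loop-over-parts/join; objective: simpler one-pass alternative.

-- ===== PORT A =====
-- parts = filename.split('/'); loop over parts[:-1] appending the transformed part; append parts[-1]; '/'.join(...)
def sanitize_dirnames_py (filename : String) (restore : Bool) : String :=
  let parts := PySem.Chars.splitOn filename.toList ['/']
  let newparts := (PySem.List.slice parts none (some (-1))).foldl (fun acc part =>
      if restore then acc ++ ['_' :: part]
      else if PySem.Chars.startswith part ['_'] then acc ++ [PySem.List.slice part (some 1) none]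
      else acc ++ [part]) []
  let newparts2 := newparts ++ [PySem.List.pyGetD parts (-1) []]
  String.ofList (PySem.Chars.join ['/'] newparts2)

-- ===== PORT B =====
-- one step of B's scan: at the start of a component either insert '_' (restore) or swallow one '_'
def pvStep (restore : Bool) (st : List Char × Bool) (ch : Char) : List Char × Bool :=
  if st.2 then
    if restore then (st.1 ++ ['_', ch], ch == '/')
    else if ch == '_' then (st.1, false)
    else (st.1 ++ [ch], ch == '/')
  else (st.1 ++ [ch], ch == '/')

-- head, sep, last = filename.rpartition('/') (ported via findIdx? on the reversed list); if no '/',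
-- return filename unchanged; else scan head+'/' character by character and append last untouched.
def sanitize_dirnames_py_alt (filename : String) (restore : Bool) : String :=
  let cs := filename.toList
  match cs.reverse.findIdx? (fun c => c == '/') with
  | none => filename
  | some k =>
    let head := (cs.reverse.drop (k + 1)).reverse
    let last := (cs.reverse.take k).reverse
    let res := ((head ++ ['/']).foldl (pvStep restore) ([], true)).1
    String.ofList (res ++ last)

-- ===== PRECONDITION & SPEC =====
def Spec_sanitize_dirnames_py (filename : String) (restore : Bool) (out : String) : Prop := out = sanitize_dirnames_py_alt filename restore
instance (filename : String) (restore : Bool) (out : String) : Decidable (Spec_sanitize_dirnames_py filename restore out) := by unfold Spec_sanitize_dirnames_py; infer_instance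

-- ===== CLAIM (what is proved, stated in full; the proofs are below) =====
def Claim_equal_sanitize_dirnames_py : Prop := ∀ (filename : String) (restore : Bool), Dom_sanitize_dirnames_py filename restore → Spec_sanitize_dirnames_py filename restore (sanitize_dirnames_py filename restore)

-- ===== LEMMAS AND PROOFS =====

-- the per-component transformation A applies to every directory-name part
def pvG (restore : Bool) (part : List Char) : List Char :=
  if restore then '_' :: part
  else if PySem.Chars.startswith part ['_'] then PySem.List.slice part (some 1) none
  else part

-- prepend to the first component (functional picture of splitOn's accumulator)
def pvConsFirst (x : List Char) : List (List Char) → List (List Char)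
  | [] => [x]
  | p :: ps => (x ++ p) :: ps

-- structural specification of filename.split('/')
def pvSp : List Char → List (List Char)
  | [] => [[]]
  | c :: cs => if c = '/' then [] :: pvSp cs else pvConsFirst [c] (pvSp cs)

-- rendering of a transformed component list, one trailing '/' after each component
def pvRenderT (restore : Bool) : List (List Char) → List Char
  | [] => []
  | p :: ps => pvG restore p ++ '/' :: pvRenderT restore ps

-- same, but the first component is copied untouched (the scan reached it in mid-component state)
def pvRenderF (restore : Bool) : List (List Char) → List Char
  | [] => []
  | p :: ps => p ++ '/' :: pvRenderT restore ps

lemma pvSp_cons (cs : List Char) : ∃ q qs, pvSp cs = q :: qs := by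
  induction cs with
  | nil => exact ⟨[], [], rfl⟩
  | cons c cs ih =>
    rcases ih with ⟨q, qs, h⟩
    by_cases hc : c = '/'
    · exact ⟨[], pvSp cs, by simp [pvSp, hc]⟩
    · exact ⟨c :: q, qs, by simp [pvSp, hc, h, pvConsFirst]⟩

lemma pv_splitOn_go (l : List Char) : ∀ (fuel : Nat) (cur : List Char) (acc : List (List Char)),
    l.length < fuel →
    PySem.Chars.splitOn.go ['/'] fuel l cur acc = acc.reverse ++ pvConsFirst cur.reverse (pvSp l) := by
  induction l with
  | nil =>
    intro fuel cur acc h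
    cases fuel with
    | zero => omega
    | succ f => simp [PySem.Chars.splitOn.go, pvSp, pvConsFirst]
  | cons c rest ih =>
    intro fuel cur acc h
    cases fuel with
    | zero => omega
    | succ f =>
    have hlen : rest.length < f := by simpa using h
    by_cases hc : c = '/'
    · subst hc
      rw [show PySem.Chars.splitOn.go ['/'] (f+1) ('/' :: rest) cur acc
            = PySem.Chars.splitOn.go ['/'] f rest [] (cur.reverse :: acc) from by
        simp [PySem.Chars.splitOn.go, List.isPrefixOf]]
      rw [ih f [] (cur.reverse :: acc) hlen]
      rcases pvSp_cons rest with ⟨q, qs, hq⟩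
      simp [pvSp, hq, pvConsFirst]
    · rw [show PySem.Chars.splitOn.go ['/'] (f+1) (c :: rest) cur acc
            = PySem.Chars.splitOn.go ['/'] f rest (c :: cur) acc from by
        simp [PySem.Chars.splitOn.go, List.isPrefixOf, hc, Ne.symm hc]]
      rw [ih f (c :: cur) acc hlen]
      rcases pvSp_cons rest with ⟨q, qs, hq⟩
      simp [pvSp, hq, hc, pvConsFirst]

lemma pvSp_ne_nil (cs : List Char) : pvSp cs ≠ [] := by
  rcases pvSp_cons cs with ⟨q, qs, h⟩; simp [h]

lemma pv_splitOn_eq (cs : List Char) : PySem.Chars.splitOn cs ['/'] = pvSp cs := by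
  unfold PySem.Chars.splitOn
  rw [pv_splitOn_go cs (cs.length + 1) [] [] (by omega)]
  rcases pvSp_cons cs with ⟨q, qs, hq⟩
  simp [hq, pvConsFirst]

lemma pvSp_no_slash {cs : List Char} (h : '/' ∉ cs) : pvSp cs = [cs] := by
  induction cs with
  | nil => rfl
  | cons c cs ih =>
    simp at h
    simp [pvSp, Ne.symm h.1, ih h.2, pvConsFirst, h.1]

lemma pvSp_append_last {b : List Char} (a : List Char) (h : '/' ∉ b) :
    pvSp (a ++ '/' :: b) = pvSp a ++ [b] := by
  induction a with
  | nil => simp [pvSp, pvSp_no_slash h]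
  | cons c a ih =>
    by_cases hc : c = '/'
    · simp [pvSp, hc, ih]
    · rcases pvSp_cons (a ++ '/' :: b) with ⟨q, qs, hq⟩
      rcases pvSp_cons a with ⟨p, ps, hp⟩
      simp [pvSp, hc, ih, hp, pvConsFirst]

lemma pv_scan (restore : Bool) : ∀ (head out : List Char),
    (List.foldl (pvStep restore) (out, true) (head ++ ['/']) = (out ++ pvRenderT restore (pvSp head), true)) ∧
    (List.foldl (pvStep restore) (out, false) (head ++ ['/']) = (out ++ pvRenderF restore (pvSp head), true)) := by
  intro head
  induction head with
  | nil =>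
    intro out
    constructor
    · by_cases hr : restore <;>
        simp [pvStep, hr, pvSp, pvRenderT, pvG, PySem.Chars.startswith, List.isPrefixOf]
    · simp [pvStep, pvSp, pvRenderF, pvRenderT]
  | cons c h ih =>
    intro out
    rcases pvSp_cons h with ⟨q, qs, hq⟩
    constructor
    · by_cases hc : c = '/'
      · subst hc
        by_cases hr : restore
        · have e : pvStep restore (out, true) '/' = (out ++ ['_', '/'], true) := by
            simp [pvStep, hr]
          rw [List.cons_append, List.foldl_cons, e, (ih _).1]
          simp [pvSp, pvRenderT, pvG, hr]
        · have e : pvStep restore (out, true) '/' = (out ++ ['/'], true) := by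
            simp [pvStep, hr]
          rw [List.cons_append, List.foldl_cons, e, (ih _).1]
          simp [pvSp, pvRenderT, pvG, hr, PySem.Chars.startswith, List.isPrefixOf]
      · by_cases hr : restore
        · have e : pvStep restore (out, true) c = (out ++ ['_', c], false) := by
            simp [pvStep, hr, hc]
          rw [List.cons_append, List.foldl_cons, e, (ih _).2]
          simp [pvSp, hc, hq, pvConsFirst, pvRenderF, pvRenderT, pvG, hr]
        · by_cases hu : c = '_'
          · subst hu
            have e : pvStep restore (out, true) '_' = (out, false) := by
              simp [pvStep, hr]
            rw [List.cons_append, List.foldl_cons, e, (ih _).2]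
            simp [pvSp, hq, pvConsFirst, pvRenderF, pvRenderT, pvG, hr,
                  PySem.Chars.startswith, List.isPrefixOf, PySem.List.slice_from]
          · have e : pvStep restore (out, true) c = (out ++ [c], false) := by
              simp [pvStep, hr, hc, hu]
            rw [List.cons_append, List.foldl_cons, e, (ih _).2]
            simp [pvSp, hc, hq, pvConsFirst, pvRenderF, pvRenderT, pvG, hr,
                  PySem.Chars.startswith, List.isPrefixOf, hu, Ne.symm hu]
    · by_cases hc : c = '/'
      · subst hc
        have e : pvStep restore (out, false) '/' = (out ++ ['/'], true) := by
          simp [pvStep]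
        rw [List.cons_append, List.foldl_cons, e, (ih _).1]
        simp [pvSp, pvRenderF, pvRenderT]
      · have e : pvStep restore (out, false) c = (out ++ [c], false) := by
          simp [pvStep, hc]
        rw [List.cons_append, List.foldl_cons, e, (ih _).2]
        simp [pvSp, hc, hq, pvConsFirst, pvRenderF, pvRenderT]

lemma pv_join_map_append (restore : Bool) (ps : List (List Char)) (last : List Char) (h : ps ≠ []) :
    PySem.Chars.join ['/'] (ps.map (pvG restore) ++ [last]) = pvRenderT restore ps ++ last := by
  induction ps with
  | nil => simp at h
  | cons p ps ih =>
    cases ps with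
    | nil => simp [PySem.Chars.join_cons_cons, PySem.Chars.join_singleton, pvRenderT]
    | cons q qs =>
      rw [List.map_cons, List.cons_append]
      rw [show List.map (pvG restore) (q :: qs) ++ [last]
            = pvG restore q :: (List.map (pvG restore) qs ++ [last]) from by simp]
      rw [PySem.Chars.join_cons_cons]
      rw [show pvG restore q :: (List.map (pvG restore) qs ++ [last])
            = List.map (pvG restore) (q :: qs) ++ [last] from by simp]
      rw [ih (by simp)]
      simp [pvRenderT]

lemma pv_foldA (restore : Bool) (ps : List (List Char)) (acc : List (List Char)) :
    List.foldl (fun acc part =>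
      if restore then acc ++ ['_' :: part]
      else if PySem.Chars.startswith part ['_'] then acc ++ [PySem.List.slice part (some 1) none]
      else acc ++ [part]) acc ps = acc ++ ps.map (pvG restore) := by
  have h : (fun (acc : List (List Char)) part =>
      if restore then acc ++ ['_' :: part]
      else if PySem.Chars.startswith part ['_'] then acc ++ [PySem.List.slice part (some 1) none]
      else acc ++ [part]) = (fun acc part => acc ++ [pvG restore part]) := by
    funext acc part; unfold pvG; split_ifs <;> rfl
  rw [h, PySem.List.foldl_append_singleton_eq_map]

lemma pv_dropWhile_head_false {p : Char → Bool} {x : Char} {xs : List Char} :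
    ∀ l : List Char, l.dropWhile p = x :: xs → p x = false := by
  intro l
  induction l with
  | nil => intro h; simp at h
  | cons c cs ih =>
    intro h
    by_cases hc : p c
    · rw [List.dropWhile_cons_of_pos hc] at h
      exact ih h
    · rw [List.dropWhile_cons_of_neg hc] at h
      obtain ⟨rfl, -⟩ := List.cons.inj h
      simpa using hc

lemma pv_slice_dropLast {α : Type} (xs : List α) :
    PySem.List.slice xs none (some (-1)) = xs.dropLast := by
  simp [PySem.List.slice, List.dropLast_eq_take]

theorem pv_core (s : String) (restore : Bool) :
    sanitize_dirnames_py s restore = sanitize_dirnames_py_alt s restore := by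
  by_cases hm : '/' ∈ s.toList
  · -- there is a slash: decompose at the LAST one
    set r := s.toList.reverse with hrdef
    set p : Char → Bool := fun c => !(c == '/') with hp
    have hd : r.dropWhile p ≠ [] := by
      simp only [ne_eq, List.dropWhile_eq_nil_iff]
      push Not
      exact ⟨'/', by simpa [hrdef] using hm, by simp [hp]⟩
    set a := r.takeWhile p with ha
    obtain ⟨hc, b, hdb⟩ : ∃ hc bb, r.dropWhile p = hc :: bb := by
      cases h : r.dropWhile p with
      | nil => exact absurd h hd
      | cons x xs => exact ⟨x, xs, rfl⟩
    have hhead : hc = '/' := by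
      have h2 := pv_dropWhile_head_false _ hdb
      simpa [hp] using h2
    subst hhead
    have hr : r = a ++ '/' :: b := by
      rw [ha, ← hdb, List.takeWhile_append_dropWhile]
    have hna : '/' ∉ a := by
      intro hmem
      have := List.mem_takeWhile_imp (ha ▸ hmem)
      simp [hp] at this
    have hidx : r.findIdx? (fun c => c == '/') = some a.length := by
      rw [hr, List.findIdx?_append]
      have h1 : a.findIdx? (fun c => c == '/') = none := by
        rw [List.findIdx?_eq_none_iff]
        intro x hx
        simp only [beq_eq_false_iff_ne, ne_eq]
        rintro rfl; exact hna hx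
      rw [h1, List.findIdx?_cons]
      simp
    have hcs : s.toList = b.reverse ++ '/' :: a.reverse := by
      have : s.toList = r.reverse := by simp [hrdef]
      rw [this, hr]
      simp
    have hnar : '/' ∉ a.reverse := by simpa using hna
    -- B side
    have hB : sanitize_dirnames_py_alt s restore
        = String.ofList (pvRenderT restore (pvSp b.reverse) ++ a.reverse) := by
      simp only [sanitize_dirnames_py_alt]
      rw [← hrdef, hidx]
      have hdrop : r.drop (a.length + 1) = b := by
        rw [hr, show a ++ '/' :: b = (a ++ ['/']) ++ b by simp,
            show a.length + 1 = (a ++ ['/']).length by simp]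
        exact List.drop_left
      have htake : r.take a.length = a := by
        rw [hr]; exact List.take_left
      have hsc := (pv_scan restore b.reverse []).1
      simp [hdrop, htake, hsc]
    rw [hB]
    -- A side
    simp only [sanitize_dirnames_py]
    rw [hcs, pv_splitOn_eq, pvSp_append_last _ hnar, pv_slice_dropLast,
        List.dropLast_concat, pv_foldA, PySem.List.pyGetD_neg_one_append_singleton,
        List.nil_append, pv_join_map_append restore _ _ (pvSp_ne_nil _)]
  · -- no slash: both sides return the input unchanged
    have hidx : s.toList.reverse.findIdx? (fun c => c == '/') = none := by
      rw [List.findIdx?_eq_none_iff]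
      intro x hx
      simp only [beq_eq_false_iff_ne, ne_eq]
      rintro rfl
      exact hm (by simpa using hx)
    have hB : sanitize_dirnames_py_alt s restore = s := by
      simp only [sanitize_dirnames_py_alt]
      rw [hidx]
    rw [hB]
    simp only [sanitize_dirnames_py]
    rw [pv_splitOn_eq, pvSp_no_slash hm, pv_slice_dropLast]
    simp [PySem.Chars.join_singleton, PySem.List.pyGetD_neg_one]

-- ===== VERDICT (by name: the statement is the Claim_ definition above) =====
theorem sanitize_dirnames_py_spec : Claim_equal_sanitize_dirnames_py := by
  intro filename restore _
  exact pv_core filename restore
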